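-- pv_equiv track=rewrite | github.com/Gyuddi/Whole_thing | private/python/python/stock_price.py | solution
-- ===== SOURCE A (Python) =====
-- def solution(prices):
--     answer = []
--
--     for i in range(len(prices)):
--         count = 0
--         for j in range(i,len(prices)):
--             if prices[i] <= prices[j]:
--                 count +=1
--             else:
--                 count +=1
--                 break
--         answer.append(count)
--     answer[0] = answer[0]-1
--     answer.pop(-1)
--     answer.append(0)
--     return answer
-- ===== SOURCE B (Python) =====
-- def solution(prices):
--     # monotonic-stack next-strictly-smaller index: O(n) instead of A's O(n^2)
--     n = len(prices)
--     res = [0] * n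
--     stack = []
--     for i, p in enumerate(prices):
--         while stack and prices[stack[-1]] > p:
--             j = stack.pop()
--             res[j] = i - j + 1
--         stack.append(i)
--     for j in stack:
--         res[j] = n - j
--     res[0] -= 1
--     res[-1] = 0
--     return res
-- ===== Notes on version B (the rewrite author's own statement) =====
-- stated objective: faster
-- what changed: Replaced A's per-index rescan of the suffix (nested loops with break) by a single monotonic-stack pass computing each index's next strictly smaller element, then the same first/last fixups.
import Mathlib
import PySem

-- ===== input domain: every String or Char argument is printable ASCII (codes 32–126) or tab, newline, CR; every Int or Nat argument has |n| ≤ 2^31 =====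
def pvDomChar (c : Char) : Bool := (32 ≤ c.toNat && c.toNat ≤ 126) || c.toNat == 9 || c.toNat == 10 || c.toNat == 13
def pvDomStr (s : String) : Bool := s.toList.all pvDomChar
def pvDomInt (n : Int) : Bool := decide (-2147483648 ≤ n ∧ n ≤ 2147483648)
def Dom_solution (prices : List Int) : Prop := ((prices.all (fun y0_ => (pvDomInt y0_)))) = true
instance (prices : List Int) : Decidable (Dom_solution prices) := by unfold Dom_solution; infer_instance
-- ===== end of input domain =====

-- B replaces A's quadratic per-index suffix rescan by one monotonic-stack pass (next strictly smaller element); same fixups.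

-- ===== PORT A =====
-- inner 'for j in range(i, n)' loop with its break; all indices visited are in range,
-- so prices.getD j 0 is exactly Python's prices[j] here
def innerA (pi : Int) (prices : List Int) : List Nat → Int → Int
  | [], c => c
  | j :: rest, c =>
      if pi ≤ prices.getD j 0 then innerA pi prices rest (c + 1) else c + 1

def solution (prices : List Int) : List Int :=
  let n := prices.length
  let answer := (List.range n).map (fun i => innerA (prices.getD i 0) prices (List.range' i (n - i)) 0)
  match answer with
  | [] => []  -- Python raises IndexError at the first-element fixup here; excluded by Pre_solution
  | a0 :: rest => ((a0 - 1) :: rest).dropLast ++ [0]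

-- ===== PORT B =====
-- the 'while stack and prices[stack[-1]] > p' pop loop; stack head = Python stack top;
-- all indices are in range, so prices.getD j 0 is exactly Python's prices[j]
def popLoop (prices : List Int) (i : Nat) (p : Int) : List Nat → List Int → List Nat × List Int
  | [], res => ([], res)
  | j :: rest, res =>
      if prices.getD j 0 > p then
        popLoop prices i p rest (res.set j ((i : Int) - (j : Int) + 1))
      else (j :: rest, res)

def solution_alt (prices : List Int) : List Int :=
  let n := prices.length
  -- for i, p in enumerate(prices):  (zipIdx pairs are (element, index))
  let st := prices.zipIdx.foldl
    (fun (s : List Nat × List Int) pi =>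
      let s1 := popLoop prices pi.2 pi.1 s.1 s.2
      (pi.2 :: s1.1, s1.2))
    ([], List.replicate n 0)
  -- for j in stack: res[j] = n - j
  let res := st.1.foldl (fun r j => r.set j ((n : Int) - (j : Int))) st.2
  -- decrement first entry, zero last entry (Python raises IndexError on the empty list; excluded by Pre_solution)
  match res with
  | [] => []
  | x :: xs => ((x - 1) :: xs).dropLast ++ [0]

-- ===== PRECONDITION & SPEC =====
-- Pre_ excludes only the empty list, on which A raises IndexError at its first-element fixup.
def Pre_solution (prices : List Int) : Prop := prices ≠ []
instance (prices : List Int) : Decidable (Pre_solution prices) := by unfold Pre_solution; infer_instance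
def pvWitness_solution : List Int := [3, 1, 2]

def Spec_solution (prices : List Int) (out : List Int) : Prop := out = solution_alt prices
instance (prices : List Int) (out : List Int) : Decidable (Spec_solution prices out) := by unfold Spec_solution; infer_instance

-- ===== CLAIM (what is proved, stated in full; the proofs are below) =====
def Claim_equal_solution : Prop := ∀ (prices : List Int), Dom_solution prices → Pre_solution prices → Spec_solution prices (solution prices)

-- ===== LEMMAS AND PROOFS =====

-- index of the first strictly smaller price after j, looking only below i
def nf (prices : List Int) (i j : Nat) : Option Nat :=
  (List.range' (j + 1) (i - (j + 1))).find? (fun k => decide (prices.getD k 0 < prices.getD j 0))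

-- the stack contents after B has processed the prefix [0, i)
def stk (prices : List Int) (i : Nat) : List Nat :=
  ((List.range i).filter (fun j => (nf prices i j).isNone)).reverse

-- the result-array contents after B has processed the prefix [0, i)
def resF (prices : List Int) (i j : Nat) : Int :=
  match nf prices i j with
  | some k => (k : Int) - (j : Int) + 1
  | none => 0

-- the per-index value both programs compute before the first/last fixups
def fFinal (prices : List Int) (n j : Nat) : Int :=
  match nf prices n j with
  | some k => (k : Int) - (j : Int) + 1
  | none => (n : Int) - (j : Int)

theorem nf_none_iff (prices : List Int) (i j : Nat) :
    nf prices i j = none ↔ ∀ k, j < k → k < i → prices.getD j 0 ≤ prices.getD k 0 := by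
  unfold nf
  rw [List.find?_eq_none]
  constructor
  · intro h k hk1 hk2
    have := h k (by rw [List.mem_range'_1]; omega)
    simpa using this
  · intro h k hk
    rw [List.mem_range'_1] at hk
    simpa using h k (by omega) (by omega)

theorem nf_none_of_le (prices : List Int) (i j : Nat) (h : i ≤ j + 1) : nf prices i j = none := by
  unfold nf
  rw [Nat.sub_eq_zero_of_le h]
  rfl

theorem nf_succ (prices : List Int) (i j : Nat) (hj : j < i) :
    nf prices (i + 1) j =
      (match nf prices i j with
       | some k => some k
       | none => if prices.getD i 0 < prices.getD j 0 then some i else none) := by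
  unfold nf
  have h1 : i + 1 - (j + 1) = (i - (j + 1)) + 1 := by omega
  have h2 : j + 1 + (i - (j + 1)) = i := by omega
  rw [h1, List.range'_1_concat, h2, List.find?_append]
  cases hf : (List.range' (j+1) (i - (j+1))).find? (fun k => decide (prices.getD k 0 < prices.getD j 0)) with
  | some k => rfl
  | none =>
    rw [List.find?_singleton]
    by_cases h : prices.getD i 0 < prices.getD j 0
    · rw [decide_eq_true_eq.mpr h, if_pos h]
      rfl
    · rw [decide_eq_false_iff_not.mpr h, if_neg h]
      rfl

theorem mem_stk (prices : List Int) (i j : Nat) :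
    j ∈ stk prices i ↔ j < i ∧ nf prices i j = none := by
  unfold stk
  rw [List.mem_reverse, List.mem_filter, List.mem_range, Option.isNone_iff_eq_none]

theorem innerA_eq (prices : List Int) (pi : Int) :
    ∀ m s c, innerA pi prices (List.range' s m) c =
      c + (match (List.range' s m).find? (fun k => decide (prices.getD k 0 < pi)) with
           | some k => (k : Int) - (s : Int) + 1
           | none => (m : Int)) := by
  intro m
  induction m with
  | zero => intro s c; simp [innerA]
  | succ m ih =>
    intro s c
    rw [List.range'_succ, innerA]
    by_cases hle : pi ≤ prices.getD s 0
    · rw [if_pos hle, ih (s+1) (c+1)]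
      have hf : (decide (prices.getD s 0 < pi)) = false := by
        rw [decide_eq_false_iff_not]; exact not_lt.mpr hle
      simp only [List.find?_cons, hf]
      cases hfind : (List.range' (s+1) m).find? (fun k => decide (prices.getD k 0 < pi)) with
      | none => push_cast; ring
      | some k => push_cast; ring
    · rw [if_neg hle]
      have hf : (decide (prices.getD s 0 < pi)) = true := by
        rw [decide_eq_true_eq]; exact not_le.mp hle
      simp only [List.find?_cons, hf]
      ring

theorem setMap (n j : Nat) (g : Nat → Int) (v : Int) :
    ((List.range n).map g).set j v =
      (List.range n).map (fun k => if k = j then v else g k) := by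
  apply List.ext_getElem
  · simp
  · intro m h1 h2
    simp only [List.length_set, List.length_map, List.length_range] at h1
    rw [List.getElem_set]
    simp only [List.getElem_map, List.getElem_range]
    split_ifs with h3 h4 h4 <;> first | rfl | omega

theorem drainEq (n : Nat) :
    ∀ (s : List Nat) (g : Nat → Int), (∀ j ∈ s, j < n) →
      s.foldl (fun r j => r.set j ((n : Int) - (j : Int))) ((List.range n).map g) =
        (List.range n).map (fun k => if k ∈ s then (n : Int) - (k : Int) else g k) := by
  intro s
  induction s with
  | nil => intro g _; simp
  | cons j rest ih =>
    intro g hlt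
    simp only [List.foldl_cons]
    rw [setMap n j g _, ih _ (fun x hx => hlt x (List.mem_cons_of_mem _ hx))]
    apply List.map_congr_left
    intro k _
    by_cases hk1 : k ∈ rest
    · simp [hk1, List.mem_cons]
    · by_cases hk2 : k = j <;> simp [hk1, hk2, List.mem_cons]

theorem popLoop_spec (prices : List Int) (i : Nat) (p : Int) (n : Nat) :
    ∀ (s : List Nat) (g : Nat → Int),
      (∀ j ∈ s, j < i ∧ ∀ k, j < k → k < i → prices.getD j 0 ≤ prices.getD k 0) →
      List.Pairwise (· > ·) s →
      (∀ j ∈ s, j < n) →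
      popLoop prices i p s ((List.range n).map g) =
        (s.filter (fun j => decide (prices.getD j 0 ≤ p)),
         (List.range n).map (fun k =>
           if k ∈ s ∧ p < prices.getD k 0 then (i : Int) - (k : Int) + 1 else g k)) := by
  intro s
  induction s with
  | nil =>
    intro g _ _ _
    rw [popLoop, Prod.mk.injEq]
    refine ⟨rfl, ?_⟩
    exact (List.map_congr_left (fun k _ => by
      rw [if_neg (fun h => (List.not_mem_nil h.1 : False))])).symm
  | cons j rest ih =>
    intro g hgood hpw hlt
    by_cases hj : prices.getD j 0 > p
    · rw [popLoop, if_pos hj, setMap n j g _]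
      rw [ih _ (fun x hx => hgood x (List.mem_cons_of_mem _ hx)) (List.Pairwise.of_cons hpw)
            (fun x hx => hlt x (List.mem_cons_of_mem _ hx))]
      have hfst : List.filter (fun j => decide (prices.getD j 0 ≤ p)) rest
          = List.filter (fun j => decide (prices.getD j 0 ≤ p)) (j :: rest) := by
        have hd : (decide (prices.getD j 0 ≤ p)) = false := by
          rw [decide_eq_false_iff_not]; exact not_le.mpr hj
        rw [List.filter_cons, hd]
        simp only [Bool.false_eq_true, if_false]
      have hsnd : List.map (fun k =>
            if k ∈ rest ∧ p < prices.getD k 0 then (i : Int) - (k : Int) + 1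
            else if k = j then (i : Int) - (j : Int) + 1 else g k) (List.range n)
          = List.map (fun k =>
            if k ∈ j :: rest ∧ p < prices.getD k 0 then (i : Int) - (k : Int) + 1
            else g k) (List.range n) := by
        apply List.map_congr_left
        intro k _
        split_ifs with h1 h2 h3 h4 h5
        · rfl
        · exact absurd ⟨List.mem_cons_of_mem _ h1.1, h1.2⟩ h2
        · subst h3; rfl
        · exact absurd ⟨by rw [h3]; exact List.mem_cons_self, by rw [h3]; exact hj⟩ h4
        · exfalso
          rcases List.mem_cons.mp h5.1 with hm | hm
          · exact h3 hm
          · exact h1 ⟨hm, h5.2⟩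
        · rfl
      rw [Prod.mk.injEq]; exact ⟨hfst, hsnd⟩
    · rw [popLoop, if_neg hj]
      have hrest : ∀ x ∈ rest, prices.getD x 0 ≤ p := by
        intro x hx
        have hxj : x < j := (List.pairwise_cons.mp hpw).1 x hx
        have hji : j < i := (hgood j List.mem_cons_self).1
        have := (hgood x (List.mem_cons_of_mem _ hx)).2 j hxj hji
        exact le_trans this (not_lt.mp hj)
      have hfst : j :: rest
          = List.filter (fun j => decide (prices.getD j 0 ≤ p)) (j :: rest) := by
        have h1 : (decide (prices.getD j 0 ≤ p)) = true := by
          rw [decide_eq_true_eq]; exact not_lt.mp hj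
        rw [List.filter_cons, h1]
        simp only [if_true]
        exact congrArg (j :: ·) (List.filter_eq_self.mpr (fun a ha => by
          rw [decide_eq_true_eq]; exact hrest a ha)).symm
      have hsnd : List.map g (List.range n)
          = List.map (fun k =>
            if k ∈ j :: rest ∧ p < prices.getD k 0 then (i : Int) - (k : Int) + 1
            else g k) (List.range n) := by
        apply (List.map_congr_left ?_).symm
        intro k _
        refine if_neg (fun h => ?_)
        rcases List.mem_cons.mp h.1 with hm | hm
        · subst hm; exact hj h.2
        · exact absurd h.2 (not_lt.mpr (hrest k hm))
      rw [Prod.mk.injEq]; exact ⟨hfst, hsnd⟩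

theorem stk_prop (prices : List Int) (i : Nat) :
    ∀ j ∈ stk prices i, j < i ∧ ∀ k, j < k → k < i → prices.getD j 0 ≤ prices.getD k 0 := by
  intro j hj
  rw [mem_stk] at hj
  exact ⟨hj.1, (nf_none_iff prices i j).mp hj.2⟩

theorem stk_pairwise (prices : List Int) (i : Nat) :
    List.Pairwise (· > ·) (stk prices i) := by
  unfold stk
  rw [List.pairwise_reverse]
  exact (List.pairwise_lt_range).filter _

theorem loop_inv (prices : List Int) (n : Nat) :
    ∀ i, i ≤ n →
      (List.range i).foldl
        (fun (s : List Nat × List Int) j =>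
          let s1 := popLoop prices j (prices.getD j 0) s.1 s.2
          (j :: s1.1, s1.2))
        ([], (List.range n).map (resF prices 0))
      = (stk prices i, (List.range n).map (resF prices i)) := by
  intro i
  induction i with
  | zero =>
    intro _
    simp only [List.range_zero, List.foldl_nil]
    unfold stk
    simp
  | succ i ih =>
    intro hle
    rw [List.range_succ, List.foldl_append, ih (by omega), List.foldl_cons, List.foldl_nil]
    simp only
    rw [popLoop_spec prices i (prices.getD i 0) n (stk prices i) (resF prices i)
          (stk_prop prices i) (stk_pairwise prices i)
          (fun j hj => by have := (mem_stk prices i j).mp hj; omega)]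
    have hfst : i :: (stk prices i).filter (fun j => decide (prices.getD j 0 ≤ prices.getD i 0))
        = stk prices (i + 1) := by
      unfold stk
      rw [List.range_succ, List.filter_append]
      have hi : ((nf prices (i+1) i).isNone) = true := by
        rw [Option.isNone_iff_eq_none]
        exact nf_none_of_le prices (i+1) i (by omega)
      simp only [List.filter_cons, List.filter_nil, hi, if_true, List.reverse_append,
        List.reverse_cons, List.reverse_nil, List.nil_append, List.cons_append,
        List.nil_append]
      rw [List.cons.injEq]
      refine ⟨rfl, ?_⟩
      rw [List.filter_reverse, List.filter_filter]
      apply congrArg List.reverse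
      apply List.filter_congr
      intro j hjm
      rw [List.mem_range] at hjm
      rw [nf_succ prices i j hjm]
      cases hnf : nf prices i j with
      | some k => simp
      | none =>
        by_cases hlt : prices.getD i 0 < prices.getD j 0
        · rw [if_pos hlt, decide_eq_false_iff_not.mpr (not_le.mpr hlt)]
          rfl
        · rw [if_neg hlt, decide_eq_true_eq.mpr (not_lt.mp hlt)]
          rfl
    have hsnd : List.map (fun k =>
          if k ∈ stk prices i ∧ prices.getD i 0 < prices.getD k 0
          then (i : Int) - (k : Int) + 1 else resF prices i k) (List.range n)
        = List.map (resF prices (i+1)) (List.range n) := by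
      apply List.map_congr_left
      intro k _
      by_cases hk : k < i
      · unfold resF
        rw [nf_succ prices i k hk]
        cases hnf : nf prices i k with
        | some m =>
          rw [if_neg (fun h => by
            have := (mem_stk prices i k).mp h.1
            rw [hnf] at this
            exact Option.some_ne_none m this.2)]
        | none =>
          by_cases hlt : prices.getD i 0 < prices.getD k 0
          · rw [if_pos ⟨(mem_stk prices i k).mpr ⟨hk, hnf⟩, hlt⟩, if_pos hlt]
          · rw [if_neg (fun h => hlt h.2), if_neg hlt]
      · have h1 : nf prices i k = none := nf_none_of_le prices i k (by omega)
        have h2 : nf prices (i+1) k = none := nf_none_of_le prices (i+1) k (by omega)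
        rw [if_neg (fun h => by have := (mem_stk prices i k).mp h.1; omega)]
        unfold resF
        rw [h1, h2]
    rw [Prod.mk.injEq]
    exact ⟨hfst, hsnd⟩

theorem counts_eq (prices : List Int) :
    (List.range prices.length).map
        (fun i => innerA (prices.getD i 0) prices (List.range' i (prices.length - i)) 0)
      = (List.range prices.length).map (fFinal prices prices.length) := by
  apply List.map_congr_left
  intro i hi
  rw [List.mem_range] at hi
  have hm : prices.length - i = (prices.length - (i+1)) + 1 := by omega
  rw [hm, List.range'_succ, innerA, if_pos (le_refl _), innerA_eq prices (prices.getD i 0)]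
  unfold fFinal nf
  cases hf : (List.range' (i+1) (prices.length - (i+1))).find?
      (fun k => decide (prices.getD k 0 < prices.getD i 0)) with
  | some k => push_cast; ring
  | none =>
    have : ((prices.length - (i+1) : Nat) : Int) = (prices.length : Int) - i - 1 := by omega
    rw [this]; ring

theorem zipIdx_eq (prices : List Int) :
    prices.zipIdx = (List.range prices.length).map (fun j => (prices.getD j 0, j)) := by
  apply List.ext_getElem
  · simp
  · intro m h1 h2
    simp [List.getElem_zipIdx, List.getD_eq_getElem?_getD]
    rw [List.getElem?_eq_getElem (by simpa using h1)]
    rfl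

theorem replicate_eq_map_resF (prices : List Int) (n : Nat) :
    List.replicate n (0 : Int) = (List.range n).map (resF prices 0) := by
  have : ∀ j, resF prices 0 j = 0 := by
    intro j
    unfold resF
    rw [nf_none_of_le prices 0 j (by omega)]
  rw [List.map_congr_left (fun j _ => this j)]
  simp

theorem alt_counts_eq (prices : List Int) :
    (prices.zipIdx.foldl
       (fun (s : List Nat × List Int) pi =>
         let s1 := popLoop prices pi.2 pi.1 s.1 s.2
         (pi.2 :: s1.1, s1.2))
       ([], List.replicate prices.length 0)).1.foldl
      (fun r j => r.set j ((prices.length : Int) - (j : Int)))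
      (prices.zipIdx.foldl
       (fun (s : List Nat × List Int) pi =>
         let s1 := popLoop prices pi.2 pi.1 s.1 s.2
         (pi.2 :: s1.1, s1.2))
       ([], List.replicate prices.length 0)).2
      = (List.range prices.length).map (fFinal prices prices.length) := by
  rw [zipIdx_eq, List.foldl_map, replicate_eq_map_resF prices prices.length]
  rw [loop_inv prices prices.length prices.length (le_refl _)]
  rw [drainEq prices.length (stk prices prices.length) (resF prices prices.length)
        (fun j hj => ((mem_stk prices prices.length j).mp hj).1)]
  apply List.map_congr_left
  intro k hk
  rw [List.mem_range] at hk
  unfold fFinal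
  cases hnf : nf prices prices.length k with
  | some m =>
    rw [if_neg (fun h => by
      have := (mem_stk prices prices.length k).mp h
      rw [hnf] at this
      exact Option.some_ne_none m this.2)]
    unfold resF
    rw [hnf]
  | none =>
    rw [if_pos ((mem_stk prices prices.length k).mpr ⟨hk, hnf⟩)]

-- ===== VERDICT (by name: the statement is the Claim_ definition above) =====
theorem solution_spec : Claim_equal_solution := by
  intro prices _ hpre
  unfold Spec_solution solution solution_alt
  simp only [counts_eq prices, alt_counts_eq prices]
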